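-- pv_equiv track=rewrite | github.com/Versike/text_node_search | tree.py | structure_preparation
-- ===== SOURCE A (Python) =====
-- def structure_preparation(data: list) -> dict:
--     articles = dict()
--     for line in data:
--         if line[0] not in articles:
--             articles[line[0]] = [line[1:]]
--         else:
--             if line[1:] not in articles[line[0]]:
--                 articles[line[0]].append(line[1:])
--     return articles
-- ===== SOURCE B (Python) =====
-- def structure_preparation(data: list) -> dict:
--     # Pass 1: group every tail under its first field (duplicates kept).
--     groups = dict()
--     for line in data:
--         groups.setdefault(line[0], []).append(line[1:])
--     # Pass 2: order-preserving dedup of each group's list.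
--     result = dict()
--     for key, values in groups.items():
--         seen = []
--         for v in values:
--             if v not in seen:
--                 seen.append(v)
--         result[key] = seen
--     return result
-- ===== Notes on version B (the rewrite author's own statement) =====
-- stated objective: alternative
-- what changed: Single interleaved membership-checked grouping loop replaced by two passes: first group all tails per key with setdefault/append, then dedup each group's list order-preservingly.
import Mathlib
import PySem

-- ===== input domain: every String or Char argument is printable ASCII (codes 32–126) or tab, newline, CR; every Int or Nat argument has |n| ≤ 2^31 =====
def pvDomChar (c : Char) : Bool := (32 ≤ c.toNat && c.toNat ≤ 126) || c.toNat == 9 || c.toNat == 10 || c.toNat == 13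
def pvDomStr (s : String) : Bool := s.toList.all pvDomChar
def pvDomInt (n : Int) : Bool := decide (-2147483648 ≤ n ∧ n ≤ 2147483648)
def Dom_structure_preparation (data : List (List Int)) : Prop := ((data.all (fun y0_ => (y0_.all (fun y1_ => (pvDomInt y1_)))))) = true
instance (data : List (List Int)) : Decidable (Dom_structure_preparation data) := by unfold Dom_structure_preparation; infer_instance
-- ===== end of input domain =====

-- B replaces A's interleaved membership-checked grouping with two passes (group everything, then dedup); equal return values on nonempty-line inputs.

-- ===== PORT A =====
-- one loop: if key new, start [tail]; else append tail only if not already present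
def pvStepA (d : PySem.Dict Int (List (List Int))) (line : List Int) :
    PySem.Dict Int (List (List Int)) :=
  match PySem.List.pyGet? line 0 with
  | none => d  -- IndexError (line[0] on empty line); excluded by Pre_
  | some k =>
    let rest := PySem.List.slice line (some 1) none
    if d.contains k then
      if rest ∈ d.getD k [] then d else d.modify k [] (fun vs => vs ++ [rest])
    else d.insert k [rest]

def structure_preparation (data : List (List Int)) : List (Int × List (List Int)) :=
  (data.foldl pvStepA PySem.Dict.empty).items

-- ===== PORT B =====
-- pass 1: groups.setdefault(line[0], []).append(line[1:])
def pvStepB (d : PySem.Dict Int (List (List Int))) (line : List Int) :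
    PySem.Dict Int (List (List Int)) :=
  match PySem.List.pyGet? line 0 with
  | none => d  -- IndexError; excluded by Pre_
  | some k => d.modify k [] (fun vs => vs ++ [PySem.List.slice line (some 1) none])

-- pass 2 inner loop: order-preserving dedup via list membership
def pvDedup (vs : List (List Int)) : List (List Int) :=
  vs.foldl (fun seen v => if v ∈ seen then seen else seen ++ [v]) []

def structure_preparation_alt (data : List (List Int)) : List (Int × List (List Int)) :=
  ((data.foldl pvStepB PySem.Dict.empty).items.foldl
    (fun r kv => r.insert kv.1 (pvDedup kv.2)) PySem.Dict.empty).items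

-- ===== PRECONDITION & SPEC =====
-- Pre_ excludes data containing an empty line: there line[0] raises IndexError in both A and B.
def Pre_structure_preparation (data : List (List Int)) : Prop := ∀ line ∈ data, line ≠ []
instance (data : List (List Int)) : Decidable (Pre_structure_preparation data) := by
  unfold Pre_structure_preparation; infer_instance
def pvWitness_structure_preparation : List (List Int) := [[1, 2], [1, 2], [1, 3], [2]]

def Spec_structure_preparation (data : List (List Int)) (out : List (Int × List (List Int))) : Prop := out = structure_preparation_alt data
instance (data : List (List Int)) (out : List (Int × List (List Int))) : Decidable (Spec_structure_preparation data out) := by unfold Spec_structure_preparation; infer_instance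

-- ===== CLAIM (what is proved, stated in full; the proofs are below) =====
def Claim_equal_structure_preparation : Prop := ∀ (data : List (List Int)), Dom_structure_preparation data → Pre_structure_preparation data → Spec_structure_preparation data (structure_preparation data)

-- ===== LEMMAS AND PROOFS =====

theorem pvDedup_append (vs : List (List Int)) (v : List Int) :
    pvDedup (vs ++ [v]) = if v ∈ pvDedup vs then pvDedup vs else pvDedup vs ++ [v] := by
  simp [pvDedup, List.foldl_append]

-- master invariant for the two fold loops
theorem pv_main (data : List (List Int)) (dA dB : PySem.Dict Int (List (List Int)))
    (hk : dA.keys = dB.keys) (hnd : dB.keys.Nodup)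
    (hv : ∀ k, dA.getD k [] = pvDedup (dB.getD k [])) :
    (data.foldl pvStepA dA).keys = (data.foldl pvStepB dB).keys ∧
    (data.foldl pvStepB dB).keys.Nodup ∧
    ∀ k, (data.foldl pvStepA dA).getD k [] = pvDedup ((data.foldl pvStepB dB).getD k []) := by
  induction data generalizing dA dB with
  | nil => exact ⟨hk, hnd, hv⟩
  | cons line rest ih =>
    simp only [List.foldl_cons]
    cases hg : PySem.List.pyGet? line 0 with
    | none =>
      rw [show pvStepA dA line = dA by simp [pvStepA, hg],
        show pvStepB dB line = dB by simp [pvStepB, hg]]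
      exact ih dA dB hk hnd hv
    | some k =>
      have hcont : dA.contains k = dB.contains k := by
        rw [PySem.Dict.contains_eq_decide_mem_keys, PySem.Dict.contains_eq_decide_mem_keys, hk]
      generalize hvdef : PySem.List.slice line (some 1) none = v
      have hBstep : pvStepB dB line = dB.modify k [] (fun vs => vs ++ [v]) := by
        simp [pvStepB, hg, hvdef]
      by_cases hc : dB.contains k = true
      · -- key present in both
        have hkB : (dB.modify k [] (fun vs => vs ++ [v])).keys = dB.keys := by
          rw [PySem.Dict.keys_modify, PySem.Dict.keys_insert_of_contains _ _ hc]
        by_cases hmem : v ∈ dA.getD k []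
        · have hAstep : pvStepA dA line = dA := by
            simp [pvStepA, hg, hcont, hc, hmem, hvdef]
          refine ih _ _ ?_ ?_ ?_
          · rw [hAstep, hBstep, hk, hkB]
          · rw [hBstep, hkB]; exact hnd
          · intro j
            rw [hAstep, hBstep]
            by_cases hjk : j = k
            · rw [hjk, PySem.Dict.getD_modify_self, pvDedup_append, hv k]
              rw [hv k] at hmem
              simp [hmem]
            · rw [PySem.Dict.getD_modify_of_ne _ _ _ hjk, hv j]
        · have hAstep : pvStepA dA line = dA.modify k [] (fun vs => vs ++ [v]) := by
            simp [pvStepA, hg, hcont, hc, hmem, hvdef]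
          refine ih _ _ ?_ ?_ ?_
          · rw [hAstep, hBstep, hkB]
            rw [PySem.Dict.keys_modify, PySem.Dict.keys_insert_of_contains _ _ (hcont.trans hc), hk]
          · rw [hBstep, hkB]; exact hnd
          · intro j
            rw [hAstep, hBstep]
            by_cases hjk : j = k
            · rw [hjk, PySem.Dict.getD_modify_self, PySem.Dict.getD_modify_self,
                pvDedup_append, hv k]
              rw [hv k] at hmem
              simp [hmem]
            · rw [PySem.Dict.getD_modify_of_ne _ _ _ hjk,
                PySem.Dict.getD_modify_of_ne _ _ _ hjk, hv j]
      · -- key fresh in both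
        have hc' : dB.contains k = false := by simpa using hc
        have hAstep : pvStepA dA line = dA.insert k [v] := by
          simp [pvStepA, hg, hcont, hc', hvdef]
        have hkB : (dB.modify k [] (fun vs => vs ++ [v])).keys = dB.keys ++ [k] := by
          rw [PySem.Dict.keys_modify, PySem.Dict.keys_insert_of_not_contains _ _ hc']
        refine ih _ _ ?_ ?_ ?_
        · rw [hAstep, hBstep, hkB, PySem.Dict.keys_insert_of_not_contains _ _ (hcont ▸ hc'), hk]
        · rw [hBstep, hkB]
          refine List.Nodup.append hnd (List.nodup_singleton k) ?_
          intro a ha hb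
          have : dB.contains k = true := by
            rw [PySem.Dict.contains_eq_decide_mem_keys]
            simp only [List.mem_singleton] at hb
            subst hb; simp [ha]
          simp [this] at hc'
        · intro j
          rw [hAstep, hBstep]
          by_cases hjk : j = k
          · rw [hjk, PySem.Dict.getD_insert_self, PySem.Dict.getD_modify_self,
              PySem.Dict.getD_of_not_contains _ _ hc']
            simp [pvDedup]
          · rw [PySem.Dict.getD_insert_of_ne _ _ _ hjk,
              PySem.Dict.getD_modify_of_ne _ _ _ hjk, hv j]

-- ===== VERDICT (by name: the statement is the Claim_ definition above) =====
theorem structure_preparation_spec : Claim_equal_structure_preparation := by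
  intro data _ _
  unfold Spec_structure_preparation structure_preparation structure_preparation_alt
  obtain ⟨hk, hnd, hv⟩ := pv_main data PySem.Dict.empty PySem.Dict.empty rfl (by simp) (by
    intro k; simp [pvDedup])
  set dA := data.foldl pvStepA PySem.Dict.empty
  set dB := data.foldl pvStepB PySem.Dict.empty
  have hndA : dA.keys.Nodup := hk ▸ hnd
  have hfresh : dB.items.foldl (fun r kv => r.insert kv.1 (pvDedup kv.2)) PySem.Dict.empty
      = PySem.Dict.mk (dB.items.map (fun p => (p.1, pvDedup p.2))) := by
    have := PySem.Dict.items_foldl_insert_fresh (l := dB.items) (d := PySem.Dict.empty)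
      (k := fun p => p.1) (v := fun p => pvDedup p.2) (by simp) hnd
    apply PySem.Dict.ext
    simpa using this
  rw [hfresh]
  rw [PySem.Dict.items_eq_map_keys dA hndA [],
    show (PySem.Dict.mk (dB.items.map (fun p => (p.1, pvDedup p.2)))).items
      = dB.items.map (fun p => (p.1, pvDedup p.2)) from rfl,
    PySem.Dict.items_eq_map_keys dB hnd [], hk, List.map_map]
  exact List.map_congr_left (fun k _ => by simp [hv k])
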